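-- pv_equiv track=rewrite | github.com/Dnevvs/Algorithms_Python_developer | Data structures/L_module_fibonacci.py | module_fibonacci
-- ===== SOURCE A (Python) =====
-- def module_fibonacci(intern, k):
--     if intern == 0:
--         return 0, 1
--     else:
--         a, b = module_fibonacci(intern // 2, k)
--         c = a * (2 * b - a) % k
--         d = (a ** 2 + b ** 2) % k
--         if intern % 2 == 0:
--             return c, d
--         else:
--             return d, (c + d) % k
-- ===== SOURCE B (Python) =====
-- def module_fibonacci(intern, k):
--     if intern == 0:
--         return 0, 1
--     a, b = 0, 1
--     for bit in bin(intern)[2:]: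
--         c = a * (2 * b - a) % k
--         d = (a * a + b * b) % k
--         if bit == '1':
--             a, b = d, (c + d) % k
--         else:
--             a, b = c, d
--     return a, b
-- ===== Notes on version B (the rewrite author's own statement) =====
-- stated objective: alternative
-- what changed: Replaces the recursive fast-doubling (recursing on intern//2 and combining on return) by an iterative fast-doubling loop over the bits of intern from most significant to least, carrying the pair (a,b) as explicit loop state; Pre_ excludes intern<0 (A hits RecursionError) and k=0 with intern!=0 (A raises ZeroDivisionError).
import Mathlib
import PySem

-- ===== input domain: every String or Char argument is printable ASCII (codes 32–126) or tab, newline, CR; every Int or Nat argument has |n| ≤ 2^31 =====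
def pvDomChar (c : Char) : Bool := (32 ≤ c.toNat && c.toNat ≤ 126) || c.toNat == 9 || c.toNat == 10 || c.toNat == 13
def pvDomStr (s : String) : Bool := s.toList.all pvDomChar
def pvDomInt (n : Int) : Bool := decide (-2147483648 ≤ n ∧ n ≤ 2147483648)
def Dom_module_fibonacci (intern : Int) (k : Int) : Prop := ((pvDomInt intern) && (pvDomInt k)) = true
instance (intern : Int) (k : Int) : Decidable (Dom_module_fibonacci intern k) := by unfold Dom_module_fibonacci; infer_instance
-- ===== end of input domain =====

-- B replaces A's recursive fast doubling by an iterative most-significant-bit-first loop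
-- (alternative decomposition, same asymptotic cost). Equivalence is about return values on
-- Pre_ (intern ≥ 0, and k ≠ 0 unless intern = 0), exactly where the Python A returns.

-- ===== PORT A =====
-- fuel-based transliteration of A's recursion; fuel intern.toNat + 1 always suffices on Pre_
-- (intern ≥ 0), since intern // 2 strictly decreases toward 0 there.
def module_fibonacciAux : Nat → Int → Int → Int × Int
  | 0, _, _ => (0, 1)
  | fuel + 1, intern, k =>
    if intern = 0 then (0, 1)
    else
      let p := module_fibonacciAux fuel (PySem.Int.floordiv intern 2) k
      let a := p.1
      let b := p.2
      let c := PySem.Int.mod (a * (2 * b - a)) k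
      let d := PySem.Int.mod (a ^ 2 + b ^ 2) k
      if PySem.Int.mod intern 2 = 0 then (c, d)
      else (d, PySem.Int.mod (c + d) k)

def module_fibonacci (intern : Int) (k : Int) : Int × Int :=
  module_fibonacciAux (intern.toNat + 1) intern k

-- ===== PORT B =====
-- bin(intern)[2:] for intern > 0: the bits of intern, most significant first
def pvBits : Nat → List Bool
  | 0 => []
  | n + 1 => pvBits ((n + 1) / 2) ++ [(n + 1) % 2 == 1]

def module_fibonacci_alt (intern : Int) (k : Int) : Int × Int :=
  if intern = 0 then (0, 1)
  else
    (pvBits intern.toNat).foldl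
      (fun (p : Int × Int) (bit : Bool) =>
        let a := p.1
        let b := p.2
        let c := PySem.Int.mod (a * (2 * b - a)) k
        let d := PySem.Int.mod (a * a + b * b) k
        if bit then (d, PySem.Int.mod (c + d) k) else (c, d))
      (0, 1)

-- ===== PRECONDITION & SPEC =====
-- Pre_ excludes exactly the inputs on which the Python A raises: intern < 0 (unbounded
-- recursion, RecursionError) and k = 0 with intern ≠ 0 (ZeroDivisionError).
def Pre_module_fibonacci (intern : Int) (k : Int) : Prop :=
  0 ≤ intern ∧ (intern = 0 ∨ k ≠ 0)
instance (intern : Int) (k : Int) : Decidable (Pre_module_fibonacci intern k) := by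
  unfold Pre_module_fibonacci; infer_instance

def pvWitness_module_fibonacci : Int × Int := (10, 7)

def Spec_module_fibonacci (intern : Int) (k : Int) (out : Int × Int) : Prop := out = module_fibonacci_alt intern k
instance (intern : Int) (k : Int) (out : Int × Int) : Decidable (Spec_module_fibonacci intern k out) := by unfold Spec_module_fibonacci; infer_instance

-- ===== CLAIM (what is proved, stated in full; the proofs are below) =====
def Claim_equal_module_fibonacci : Prop := ∀ (intern : Int) (k : Int), Dom_module_fibonacci intern k → Pre_module_fibonacci intern k → Spec_module_fibonacci intern k (module_fibonacci intern k)

-- ===== LEMMAS AND PROOFS =====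

theorem pvBits_pos (n : Nat) (h : 0 < n) :
    pvBits n = pvBits (n / 2) ++ [n % 2 == 1] := by
  cases n with
  | zero => omega
  | succ m => simp [pvBits]

theorem module_fibonacciAux_eq (fuel : Nat) : ∀ (n : Nat) (k : Int), n < fuel →
    module_fibonacciAux fuel (n : Int) k =
      (pvBits n).foldl
        (fun (p : Int × Int) (bit : Bool) =>
          let a := p.1
          let b := p.2
          let c := PySem.Int.mod (a * (2 * b - a)) k
          let d := PySem.Int.mod (a * a + b * b) k
          if bit then (d, PySem.Int.mod (c + d) k) else (c, d))
        (0, 1) := by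
  induction fuel with
  | zero => intro n k h; omega
  | succ f ih =>
    intro n k h
    by_cases hn : n = 0
    · subst hn; simp [module_fibonacciAux, pvBits]
    · have hpos : 0 < n := Nat.pos_of_ne_zero hn
      have hfd : PySem.Int.floordiv (n : Int) 2 = ((n / 2 : Nat) : Int) :=
        PySem.Int.floordiv_natCast n 2
      have hlt : n / 2 < f := by omega
      have hmod : PySem.Int.mod (n : Int) 2 = ((n % 2 : Nat) : Int) :=
        PySem.Int.mod_natCast n 2
      have hz' : ((n : Int)) ≠ 0 := by exact_mod_cast hn
      rw [pvBits_pos n hpos, List.foldl_append]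
      simp only [module_fibonacciAux, if_neg hz', hfd, hmod]
      rw [ih (n / 2) k hlt]
      by_cases hpar : n % 2 = 0
      · simp [hpar, sq]
      · have hpar1 : n % 2 = 1 := by omega
        simp [hpar1, sq]

-- ===== VERDICT (by name: the statement is the Claim_ definition above) =====
theorem module_fibonacci_spec : Claim_equal_module_fibonacci := by
  intro intern k _ hpre
  obtain ⟨hnn, _⟩ := hpre
  unfold Spec_module_fibonacci module_fibonacci module_fibonacci_alt
  have hcast : ((intern.toNat : Int)) = intern := Int.toNat_of_nonneg hnn
  by_cases h0 : intern = 0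
  · subst h0; simp [module_fibonacciAux]
  · have heq := module_fibonacciAux_eq (intern.toNat + 1) intern.toNat k (by omega)
    rw [hcast] at heq
    rw [heq]
    simp [h0]
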